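-- pv_equiv track=rewrite | github.com/metadriverse/metaurban | metaurban/orca_algo/convert_mask/convert_vertex.py | find_tuning_points
-- ===== SOURCE A (Python) =====
-- def find_tuning_points(obstacle_area):
--     tuning_pts = []
--     prev_dx, prev_dy = 0,0
--     for i in range(1, len(obstacle_area)):
--         dx = obstacle_area[i][0] - obstacle_area[i-1][0]
--         dy = obstacle_area[i][1] - obstacle_area[i-1][1]
--         if dx * prev_dy != dy * prev_dx:
--             tuning_pts.append(obstacle_area[i-1])
--         prev_dx, prev_dy = dx, dy
--     return tuning_pts
-- ===== SOURCE B (Python) =====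
-- def find_tuning_points(obstacle_area):
--     # Recursive: a vertex is a turning point iff its triple of neighbours
--     # (a, b, c) is non-collinear, tested via cross(b - a, c - a).
--     if len(obstacle_area) < 3:
--         return []
--     a, b, c = obstacle_area[0], obstacle_area[1], obstacle_area[2]
--     rest = find_tuning_points(obstacle_area[1:])
--     if (b[0] - a[0]) * (c[1] - a[1]) != (b[1] - a[1]) * (c[0] - a[0]):
--         return [b] + rest
--     return rest
-- ===== Notes on version B (the rewrite author's own statement) =====
-- stated objective: alternative
-- what changed: Replaces A's iterative fold carrying a running previous delta with a structural recursion over point triples, emitting the middle point when the triple fails a collinearity test cross(b-a, c-a) != 0 instead of comparing consecutive segment deltas.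
import Mathlib
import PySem

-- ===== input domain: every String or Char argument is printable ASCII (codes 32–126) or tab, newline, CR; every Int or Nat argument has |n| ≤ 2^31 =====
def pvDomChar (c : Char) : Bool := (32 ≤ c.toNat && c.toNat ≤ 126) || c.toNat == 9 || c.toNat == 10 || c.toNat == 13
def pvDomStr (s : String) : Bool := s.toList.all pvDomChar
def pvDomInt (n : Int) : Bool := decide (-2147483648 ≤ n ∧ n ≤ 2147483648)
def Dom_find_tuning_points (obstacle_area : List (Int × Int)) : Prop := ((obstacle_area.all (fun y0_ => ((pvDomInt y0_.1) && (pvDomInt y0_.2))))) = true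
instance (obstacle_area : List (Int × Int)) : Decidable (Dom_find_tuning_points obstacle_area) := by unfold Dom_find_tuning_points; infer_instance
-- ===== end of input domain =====

-- B tests each point triple for collinearity via cross(b-a, c-a) in a structural
-- recursion, instead of A's iterative fold over a running previous delta; objective: alternative.


-- ===== PORT A =====
-- A's loop over i = 1 .. len-1 carries (previous point, prev_dx, prev_dy);
-- ported as the structural recursion over the remaining points with that same state.
def fta_loop (prev : Int × Int) (pd : Int × Int) : List (Int × Int) → List (Int × Int)
  | [] => []
  | q :: rest =>
    let dx := q.1 - prev.1
    let dy := q.2 - prev.2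
    (if dx * pd.2 ≠ dy * pd.1 then [prev] else []) ++ fta_loop q (dx, dy) rest

def find_tuning_points (obstacle_area : List (Int × Int)) : List (Int × Int) :=
  match obstacle_area with
  | [] => []
  | p :: rest => fta_loop p (0, 0) rest

-- ===== PORT B =====
-- Source B's recursion: fewer than 3 points gives []; otherwise test the leading
-- triple (a, b, c) for collinearity and recurse on the tail (obstacle_area[1:]).
def find_tuning_points_alt : List (Int × Int) → List (Int × Int)
  | a :: b :: c :: rest =>
    let rec_ := find_tuning_points_alt (b :: c :: rest)
    if (b.1 - a.1) * (c.2 - a.2) ≠ (b.2 - a.2) * (c.1 - a.1) then b :: rec_ else rec_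
  | _ => []

-- ===== PRECONDITION & SPEC =====
def Spec_find_tuning_points (obstacle_area : List (Int × Int)) (out : List (Int × Int)) : Prop := out = find_tuning_points_alt obstacle_area
instance (obstacle_area : List (Int × Int)) (out : List (Int × Int)) : Decidable (Spec_find_tuning_points obstacle_area out) := by unfold Spec_find_tuning_points; infer_instance

-- ===== CLAIM (what is proved, stated in full; the proofs are below) =====
def Claim_equal_find_tuning_points : Prop := ∀ (obstacle_area : List (Int × Int)), Dom_find_tuning_points obstacle_area → Spec_find_tuning_points obstacle_area (find_tuning_points obstacle_area)

-- ===== LEMMAS AND PROOFS =====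

-- After the first step, A's loop state at point q (with previous point p) equals
-- B's recursion on p :: q :: rest: the delta-cross test equals the triple
-- collinearity test by bilinearity of the cross product.
theorem fta_loop_eq_alt : ∀ (rest : List (Int × Int)) (p q : Int × Int),
    fta_loop q (q.1 - p.1, q.2 - p.2) rest = find_tuning_points_alt (p :: q :: rest) := by
  intro rest
  induction rest with
  | nil => intro p q; simp [fta_loop, find_tuning_points_alt]
  | cons r rest ih =>
    intro p q
    have h := ih q r
    simp only [fta_loop, find_tuning_points_alt] at h ⊢
    rw [← h]
    by_cases hc : (r.1 - q.1) * (q.2 - p.2) = (r.2 - q.2) * (q.1 - p.1)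
    · have hc' : (q.1 - p.1) * (r.2 - p.2) = (q.2 - p.2) * (r.1 - p.1) := by
        linear_combination -hc
      simp [hc, hc']
    · have hc' : ¬ (q.1 - p.1) * (r.2 - p.2) = (q.2 - p.2) * (r.1 - p.1) := by
        intro h'; exact hc (by linear_combination -h')
      simp [hc, hc']

-- ===== VERDICT (by name: the statement is the Claim_ definition above) =====
theorem find_tuning_points_spec : Claim_equal_find_tuning_points := by
  intro xs _
  unfold Spec_find_tuning_points
  match xs with
  | [] => rfl
  | [p] => rfl
  | p :: q :: rest =>
    show fta_loop p (0,0) (q :: rest) = _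
    simp only [fta_loop]
    rw [if_neg (by simp)]
    simpa using fta_loop_eq_alt rest p q
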